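-- pv_equiv track=rewrite | github.com/grevutiu-gabriel/PythonPrograms | SiteSwap Checker Array Program.py | SiteSwapCheck
-- ===== SOURCE A (Python) =====
-- def SiteSwapCheck(Numbers):
--     Numbers = Numbers.split()
--     Allowed = True
--     #Rule 1 (If divisible by 3)
--     Total = 0
--     for x in range(0, len(Numbers)):
--         Total = Total + int(Numbers[x])
--     if not ((Total)%3) == 0:
--         Allowed = False
--
--
--     #Rule 2 (no number after previous equal to one less than previous)
--     for y in range(0, (len(Numbers)-1)):
--         if int(Numbers[y]) == (int(Numbers[y+1]) + 1):
--             Allowed = False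
--
--     if int(Numbers[len(Numbers)-1]) == ((int(Numbers[0])) +1):
--             Allowed = False
--
--     if Allowed == False:
--         return("INVALID SITESWAP")
-- ===== SOURCE B (Python) =====
-- def SiteSwapCheck(Numbers):
--     toks = Numbers.split()
--     first = int(toks[0])
--
--     def go(prev, rest, total):
--         if not rest:
--             return total % 3 == 0 and prev != first + 1
--         cur = int(rest[0])
--         if prev == cur + 1:
--             return False
--         return go(cur, rest[1:], total + cur)
--
--     if not go(first, toks[1:], first):
--         return "INVALID SITESWAP"
-- ===== Notes on version B (the rewrite author's own statement) =====
-- stated objective: alternative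
-- what changed: B replaces A's three staged index-loop passes by one recursive single pass over the token list that carries the running sum and the previous value, exits early on a bad adjacent pair, and checks divisibility and the wraparound pair only at the end of the recursion.
import Mathlib
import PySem

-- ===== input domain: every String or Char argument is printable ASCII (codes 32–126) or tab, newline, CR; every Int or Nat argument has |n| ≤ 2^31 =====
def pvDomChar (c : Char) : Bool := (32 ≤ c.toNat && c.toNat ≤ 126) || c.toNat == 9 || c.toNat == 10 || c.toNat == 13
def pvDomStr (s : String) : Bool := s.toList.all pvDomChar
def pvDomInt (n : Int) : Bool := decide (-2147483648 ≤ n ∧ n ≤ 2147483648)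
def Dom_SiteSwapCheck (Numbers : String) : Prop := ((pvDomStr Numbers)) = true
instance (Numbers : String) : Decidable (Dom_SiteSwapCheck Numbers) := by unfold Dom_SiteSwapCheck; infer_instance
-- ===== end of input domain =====

-- B replaces A's three staged index-loop passes by a single recursive pass carrying the
-- running sum and the previous value, with an early exit on a bad adjacent pair (objective:
-- alternative).  A's exceptions (no tokens -> IndexError, unparseable token -> ValueError)
-- are outside Pre_.

-- ===== PORT A =====
-- int(t): Pre_ guarantees every token parses, so the ValueError case (none) is unreachable
def pyInt (t : String) : Int := (PySem.Int.ofStr? t).getD 0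

def SiteSwapCheck (Numbers : String) : Option String :=
  let ns := PySem.Str.split₀ Numbers
  let allowed0 := true
  -- Rule 1
  let total := (PySem.List.pyRange 0 (ns.length : Int) 1).foldl
      (fun t x => t + pyInt (PySem.List.pyGetD ns x "")) 0
  let allowed1 := if ¬ (PySem.Int.mod total 3 = 0) then false else allowed0
  -- Rule 2
  let allowed2 := (PySem.List.pyRange 0 ((ns.length : Int) - 1) 1).foldl
      (fun a y => if pyInt (PySem.List.pyGetD ns y "") = pyInt (PySem.List.pyGetD ns (y + 1) "") + 1
                  then false else a) allowed1
  let allowed3 := if pyInt (PySem.List.pyGetD ns ((ns.length : Int) - 1) "") = pyInt (PySem.List.pyGetD ns 0 "") + 1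
                  then false else allowed2
  if allowed3 = false then some "INVALID SITESWAP" else none

-- ===== PORT B =====
-- the inner recursive function go(prev, rest, total); `first` is captured from the closure
def goB (first : Int) (prev : Int) (rest : List String) (total : Int) : Bool :=
  match rest with
  | [] => decide (PySem.Int.mod total 3 = 0) && decide (prev ≠ first + 1)
  | t :: rs =>
    let cur := pyInt t
    if prev = cur + 1 then false else goB first cur rs (total + cur)

def SiteSwapCheck_alt (Numbers : String) : Option String :=
  match PySem.Str.split₀ Numbers with
  | [] => none   -- toks[0] raises IndexError here in both programs; outside Pre_
  | t :: rest =>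
    let first := pyInt t
    if goB first first rest first then none else some "INVALID SITESWAP"

-- ===== PRECONDITION & SPEC =====
-- Pre_ excludes exactly the inputs where A raises: no tokens (IndexError) or a token int() rejects (ValueError)
def Pre_SiteSwapCheck (Numbers : String) : Prop :=
  PySem.Str.split₀ Numbers ≠ [] ∧ ∀ t ∈ PySem.Str.split₀ Numbers, (PySem.Int.ofStr? t).isSome
instance (Numbers : String) : Decidable (Pre_SiteSwapCheck Numbers) := by unfold Pre_SiteSwapCheck; infer_instance
def pvWitness_SiteSwapCheck : String := "3 3 3"

def Spec_SiteSwapCheck (Numbers : String) (out : Option String) : Prop := out = SiteSwapCheck_alt Numbers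
instance (Numbers : String) (out : Option String) : Decidable (Spec_SiteSwapCheck Numbers out) := by unfold Spec_SiteSwapCheck; infer_instance

-- ===== CLAIM =====
def Claim_equal_SiteSwapCheck : Prop := ∀ (Numbers : String), Dom_SiteSwapCheck Numbers → Pre_SiteSwapCheck Numbers → Spec_SiteSwapCheck Numbers (SiteSwapCheck Numbers)

-- ===== LEMMAS AND PROOFS =====

-- forward-adjacency predicate of an int list with head p and tail cs
def pairBad (p : Int) (cs : List Int) : Bool :=
  match cs with
  | [] => false
  | c :: cs' => decide (p = c + 1) || pairBad c cs'

-- last element of p :: cs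
def lastI (p : Int) (cs : List Int) : Int :=
  match cs with
  | [] => p
  | c :: cs' => lastI c cs'

theorem goB_char (f : Int) (rs : List String) (p t : Int) :
    goB f p rs t
      = (!pairBad p (rs.map pyInt)
         && decide (PySem.Int.mod (List.foldl (· + ·) t (rs.map pyInt)) 3 = 0)
         && decide (lastI p (rs.map pyInt) ≠ f + 1)) := by
  induction rs generalizing p t with
  | nil => simp [goB, pairBad, lastI, Bool.and_comm]
  | cons x xs ih =>
    simp only [goB, List.map_cons, pairBad, lastI, List.foldl_cons]
    by_cases h : p = pyInt x + 1 <;> simp [h, ih]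

theorem lastI_getD (cs : List Int) (p : Int) : lastI p cs = (p :: cs).getD cs.length 0 := by
  induction cs generalizing p with
  | nil => rfl
  | cons c cs' ih => simpa [lastI] using ih c

theorem adjAny_nat (cs : List Int) (p : Int) :
    ((List.range cs.length).any fun k =>
        decide ((p :: cs).getD k 0 = (p :: cs).getD (k + 1) 0 + 1)) = pairBad p cs := by
  induction cs generalizing p with
  | nil => rfl
  | cons c cs' ih =>
    rw [List.length_cons, List.range_succ_eq_map, List.any_cons, List.any_map]
    simp only [List.getD_cons_zero, List.getD_cons_succ]
    rw [pairBad]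
    congr 1
    exact ih c

theorem foldl_if_false (l : List Int) (P : Int → Prop) [DecidablePred P] (b : Bool) :
    l.foldl (fun a y => if P y then false else a) b = (b && !(l.any fun y => decide (P y))) := by
  induction l generalizing b with
  | nil => simp
  | cons x xs ih =>
    simp only [List.foldl_cons, List.any_cons, ih]
    by_cases h : P x <;> simp [h]

theorem SiteSwapCheck_spec : Claim_equal_SiteSwapCheck := by
  intro Numbers _ hPre
  simp only [Spec_SiteSwapCheck, SiteSwapCheck, SiteSwapCheck_alt]
  obtain ⟨hne, -⟩ := hPre
  generalize hL : PySem.Str.split₀ Numbers = L at hne ⊢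
  obtain ⟨t0, ts, rfl⟩ : ∃ t0 ts, L = t0 :: ts := by
    cases L with
    | nil => exact absurd rfl hne
    | cons a b => exact ⟨a, b, rfl⟩
  -- Rule 1 total = fold of the int list starting from the head
  have htot : (PySem.List.pyRange 0 ((t0 :: ts).length : Int) 1).foldl
        (fun t x => t + pyInt (PySem.List.pyGetD (t0 :: ts) x "")) 0
      = List.foldl (· + ·) (pyInt t0) (ts.map pyInt) := by
    rw [PySem.List.foldl_pyRange_zero_pyGetD' (t0 :: ts) "" (fun t s => t + pyInt s) 0]
    simp [List.foldl_map]
  -- index bridge: pyInt (L[i]) = (map pyInt L)[i] for 0 ≤ i < len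
  have hidx : ∀ i : Int, 0 ≤ i → i < ((t0 :: ts).length : Int) →
      pyInt (PySem.List.pyGetD (t0 :: ts) i "") = (pyInt t0 :: ts.map pyInt).getD i.toNat 0 := by
    intro i h0 hi
    have hmap : (pyInt t0 :: ts.map pyInt) = (t0 :: ts).map pyInt := by simp
    have hlt : i.toNat < ((t0 :: ts).map pyInt).length := by
      simp only [List.length_map, List.length_cons]
      simp only [List.length_cons] at hi
      omega
    rw [PySem.List.pyGetD_eq_getElem (t0 :: ts) "" h0 hi, hmap,
        List.getD_eq_getElem _ _ hlt, List.getElem_map]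
  have hlen : ((t0 :: ts).length : Int) - 1 = (((ts.map pyInt).length : Nat) : Int) := by
    simp
  -- Rule 2 forward loop predicate = pairBad
  have hfwd : ((PySem.List.pyRange 0 (((t0 :: ts).length : Int) - 1) 1).any fun y =>
        decide (pyInt (PySem.List.pyGetD (t0 :: ts) y "")
          = pyInt (PySem.List.pyGetD (t0 :: ts) (y + 1) "") + 1))
      = pairBad (pyInt t0) (ts.map pyInt) := by
    rw [hlen, PySem.List.pyRange_zero_natCast, List.any_map,
        ← adjAny_nat (ts.map pyInt) (pyInt t0)]
    apply PySem.List.any_congr_mem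
    intro k hk
    rw [List.mem_range] at hk
    simp only [List.length_map] at hk
    have h1 : pyInt (PySem.List.pyGetD (t0 :: ts) (k : Int) "")
        = (pyInt t0 :: ts.map pyInt).getD k 0 := by
      have := hidx (k : Int) (Int.natCast_nonneg k)
        (by simp only [List.length_cons]; exact_mod_cast (by omega : k < ts.length + 1))
      simpa using this
    have h2 : pyInt (PySem.List.pyGetD (t0 :: ts) ((k : Int) + 1) "")
        = (pyInt t0 :: ts.map pyInt).getD (k + 1) 0 := by
      have := hidx ((k : Int) + 1) (by positivity)
        (by simp only [List.length_cons]; exact_mod_cast (by omega : k + 1 < ts.length + 1))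
      simpa using this
    simp only [Function.comp_apply, h1, h2]
  -- wraparound index = last element
  have hwrap : pyInt (PySem.List.pyGetD (t0 :: ts) (((t0 :: ts).length : Int) - 1) "")
      = lastI (pyInt t0) (ts.map pyInt) := by
    have := hidx (((t0 :: ts).length : Int) - 1)
      (by simp only [List.length_cons]; omega)
      (by simp only [List.length_cons]; omega)
    rw [this, lastI_getD]
    congr 1
    simp only [List.length_cons, List.length_map]
    omega
  have hzero : pyInt (PySem.List.pyGetD (t0 :: ts) 0 "") = pyInt t0 := by
    have := hidx 0 le_rfl (by simp only [List.length_cons]; omega)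
    simp only [Int.toNat_zero, List.getD_cons_zero] at this
    exact this
  -- evaluate both sides
  simp only [htot, goB_char, foldl_if_false, hfwd, hwrap, hzero]
  by_cases h1 : PySem.Int.mod (List.foldl (· + ·) (pyInt t0) (ts.map pyInt)) 3 = 0 <;>
    by_cases h2 : pairBad (pyInt t0) (ts.map pyInt) = true <;>
    by_cases h3 : lastI (pyInt t0) (ts.map pyInt) = pyInt t0 + 1 <;>
    simp [h1, h2, h3]
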